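-- pv_equiv track=rewrite | github.com/nexon33/voynich-grammar-analysis | scripts/phase4/validate_dor_as_red.py | get_context_examples
-- ===== SOURCE A (Python) =====
-- def get_context_examples(target, all_words, n=10):
--     """Get context examples"""
--
--     examples = []
--
--     for i, word in enumerate(all_words):
--         if target in word:
--             # Get context window
--             start = max(0, i - 3)
--             end = min(len(all_words), i + 4)
--
--             context = all_words[start:end]
--             # Highlight target
--             context_str = []
--             for w in context:
--                 if target in w:
--                     context_str.append(f"**{w.upper()}**")
--                 else:
--                     context_str.append(w)
--
--             examples.append(" ".join(context_str))
--
--             if len(examples) >= n: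
--                 break
--
--     return examples
-- ===== SOURCE B (Python) =====
-- def get_context_examples(target, all_words, n=10):
--     """Get context examples: highlight every word ONCE up front (hits table +
--     pre-formatted word table), then emit one slice-and-join per match, stopping
--     once n examples are collected; for n <= 0 no example is requested."""
--     hits = [target in w for w in all_words]
--     shown = [f"**{w.upper()}**" if h else w for w, h in zip(all_words, hits)]
--
--     examples = []
--     for i, h in enumerate(hits):
--         if len(examples) >= n:
--             break
--         if h:
--             examples.append(" ".join(shown[max(0, i - 3):i + 4]))
--     return examples
-- ===== Notes on version B (the rewrite author's own statement) =====
-- stated objective: alternative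
-- what changed: B precomputes a hits table and a highlighted-word table once so A's per-match inner highlighting loop and min() clamp disappear; each example is then a plain slice-and-join of the precomputed table, each word being formatted exactly once instead of up to 7 times per match.
-- intended difference: For n <= 0 with at least one word containing target, A still returns the first example (its break test only runs after appending), while B returns the empty list, which is the intended value when at most 0 examples are requested. — e.g. on get_context_examples("a", (["a"], 0)): A returns ["**A**"], B returns []
import Mathlib
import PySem

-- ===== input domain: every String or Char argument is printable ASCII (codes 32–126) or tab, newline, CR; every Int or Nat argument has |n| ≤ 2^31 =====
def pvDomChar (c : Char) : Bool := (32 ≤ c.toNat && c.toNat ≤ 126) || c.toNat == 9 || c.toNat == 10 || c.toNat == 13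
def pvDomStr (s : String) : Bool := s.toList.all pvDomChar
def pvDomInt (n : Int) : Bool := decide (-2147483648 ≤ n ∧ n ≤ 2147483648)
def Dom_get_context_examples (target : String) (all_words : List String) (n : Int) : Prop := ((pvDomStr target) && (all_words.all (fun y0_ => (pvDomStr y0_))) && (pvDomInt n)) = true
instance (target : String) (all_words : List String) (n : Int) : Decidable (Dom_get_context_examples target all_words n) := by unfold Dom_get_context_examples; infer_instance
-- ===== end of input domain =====

-- B precomputes a hits table and a highlighted-word table once (so A's per-match inner
-- highlighting loop and min() clamp disappear) and then emits one slice-and-join per match;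
-- for n ≤ 0 with a match B returns [] where A returns one example (stated as D_ below).

-- ===== PORT A =====
-- A's 'for i, word in enumerate(all_words)' loop with early break, as structural recursion over
-- the enumerate list; the f-string "**{w.upper()}**" is ported as a join of its pieces (exact).
def gceA_go (target : String) (all_words : List String) (n : Int) : List (Int × String) → List String → List String
  | [], examples => examples
  | (i, word) :: rest, examples =>
    if PySem.Str.isIn target word then
      -- context = all_words[max(0,i-3):min(len,i+4)]; context_str built by the inner append loop
      if n ≤ ((examples ++ [PySem.Str.join " " ((PySem.List.slice all_words (some (max 0 (i - 3))) (some (min (all_words.length : Int) (i + 4)))).foldl (fun acc w => acc ++ [if PySem.Str.isIn target w then PySem.Str.join "" ["**", PySem.Str.upper w, "**"] else w]) [])]).length : Int) then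
        examples ++ [PySem.Str.join " " ((PySem.List.slice all_words (some (max 0 (i - 3))) (some (min (all_words.length : Int) (i + 4)))).foldl (fun acc w => acc ++ [if PySem.Str.isIn target w then PySem.Str.join "" ["**", PySem.Str.upper w, "**"] else w]) [])]
      else gceA_go target all_words n rest (examples ++ [PySem.Str.join " " ((PySem.List.slice all_words (some (max 0 (i - 3))) (some (min (all_words.length : Int) (i + 4)))).foldl (fun acc w => acc ++ [if PySem.Str.isIn target w then PySem.Str.join "" ["**", PySem.Str.upper w, "**"] else w]) [])])
    else gceA_go target all_words n rest examples

def get_context_examples (target : String) (all_words : List String) (n : Int) : List String :=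
  gceA_go target all_words n (PySem.List.enumerate all_words 0) []

-- ===== PORT B =====
-- B's 'for i, h in enumerate(hits)' loop (break checked BEFORE appending), over the
-- precomputed tables; Python's slice shown[max(0,i-3):i+4] clamps by itself, so does PySem.List.slice.
def gceB_go (shown : List String) (n : Int) : List (Int × Bool) → List String → List String
  | [], examples => examples
  | (i, h) :: rest, examples =>
    if n ≤ (examples.length : Int) then examples
    else if h then
      gceB_go shown n rest (examples ++ [PySem.Str.join " " (PySem.List.slice shown (some (max 0 (i - 3))) (some (i + 4)))])
    else gceB_go shown n rest examples

def get_context_examples_alt (target : String) (all_words : List String) (n : Int) : List String :=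
  let hits := all_words.map (fun w => PySem.Str.isIn target w)
  let shown := (all_words.zip hits).map (fun p => if p.2 then PySem.Str.join "" ["**", PySem.Str.upper p.1, "**"] else p.1)
  gceB_go shown n (PySem.List.enumerate hits 0) []

-- ===== PRECONDITION & SPEC =====
-- For n ≤ 0 with at least one word containing target, A still returns the first example (its break
-- test only runs after appending), while B returns the empty list — the intended value when at most
-- 0 examples are requested.
def D_get_context_examples (target : String) (all_words : List String) (n : Int) : Prop :=
  n ≤ 0 ∧ ∃ w ∈ all_words, PySem.Str.isIn target w = true
instance (target : String) (all_words : List String) (n : Int) : Decidable (D_get_context_examples target all_words n) := by unfold D_get_context_examples; infer_instance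

def Spec_get_context_examples (target : String) (all_words : List String) (n : Int) (out : List String) : Prop := ¬ D_get_context_examples target all_words n → out = get_context_examples_alt target all_words n
instance (target : String) (all_words : List String) (n : Int) (out : List String) : Decidable (Spec_get_context_examples target all_words n out) := by unfold Spec_get_context_examples; infer_instance

def pvDiffWitness_get_context_examples : String × List String × Int := ("a", (["a"], 0))
def pvDiffWitnessOut_get_context_examples : (List String) × (List String) := (["**A**"], [])

-- ===== CLAIM (what is proved, stated in full; the proofs are below) =====
def Claim_unchanged_get_context_examples : Prop := ∀ (target : String) (all_words : List String) (n : Int), Dom_get_context_examples target all_words n → Spec_get_context_examples target all_words n (get_context_examples target all_words n)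
def Claim_changed_get_context_examples : Prop := Dom_get_context_examples (pvDiffWitness_get_context_examples.1) (pvDiffWitness_get_context_examples.2.1) (pvDiffWitness_get_context_examples.2.2) ∧ D_get_context_examples (pvDiffWitness_get_context_examples.1) (pvDiffWitness_get_context_examples.2.1) (pvDiffWitness_get_context_examples.2.2) ∧ get_context_examples (pvDiffWitness_get_context_examples.1) (pvDiffWitness_get_context_examples.2.1) (pvDiffWitness_get_context_examples.2.2) = pvDiffWitnessOut_get_context_examples.1 ∧ get_context_examples_alt (pvDiffWitness_get_context_examples.1) (pvDiffWitness_get_context_examples.2.1) (pvDiffWitness_get_context_examples.2.2) = pvDiffWitnessOut_get_context_examples.2 ∧ pvDiffWitnessOut_get_context_examples.1 ≠ pvDiffWitnessOut_get_context_examples.2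
def Claim_exact_get_context_examples : Prop := ∀ (target : String) (all_words : List String) (n : Int), Dom_get_context_examples target all_words n → D_get_context_examples target all_words n → get_context_examples target all_words n ≠ get_context_examples_alt target all_words n

-- ===== LEMMAS AND PROOFS =====

-- proof-only helpers: the common shape both loops are shown to compute
def gceFmt (target : String) (w : String) : String :=
  if PySem.Str.isIn target w then PySem.Str.join "" ["**", PySem.Str.upper w, "**"] else w

def gceContext (target : String) (all_words : List String) (i : Int) : String :=
  PySem.Str.join " " ((PySem.List.slice all_words (some (max 0 (i - 3))) (some (min (all_words.length : Int) (i + 4)))).map (gceFmt target))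

-- A's loop collects, beyond `examples`, the formatted contexts of the next max(n - |examples|, 1)
-- matching entries of the remaining enumerate suffix (the break fires only after appending,
-- hence the floor of 1).
theorem gceA_go_eq (target : String) (all_words : List String) (n : Int) :
    ∀ (L : List (Int × String)) (examples : List String),
      gceA_go target all_words n L examples
        = examples ++ (((L.filter (fun p => PySem.Str.isIn target p.2)).map (·.1)).take (max (n - examples.length) 1).toNat).map (gceContext target all_words) := by
  intro L
  induction L with
  | nil => intro examples; simp [gceA_go]
  | cons p rest ih =>
    obtain ⟨i, word⟩ := p
    intro examples
    rw [gceA_go]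
    by_cases hm : PySem.Str.isIn target word
    · rw [if_pos hm]
      have hctx : PySem.Str.join " "
          ((PySem.List.slice all_words (some (max 0 (i - 3))) (some (min (all_words.length : Int) (i + 4)))).foldl
            (fun acc w => acc ++ [if PySem.Str.isIn target w then PySem.Str.join "" ["**", PySem.Str.upper w, "**"] else w]) [])
          = gceContext target all_words i := by
        rw [PySem.List.foldl_append_singleton_eq_map, List.nil_append, gceContext]
        rfl
      have hfil : List.filter (fun p => PySem.Str.isIn target p.2) ((i, word) :: rest)
          = (i, word) :: List.filter (fun p => PySem.Str.isIn target p.2) rest := by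
        simp only [List.filter_cons]
        rw [if_pos]
        simpa using hm
      rw [hctx, hfil, List.map_cons]
      by_cases hb : n ≤ ((examples.length : Int) + 1)
      · rw [if_pos (by simp; omega)]
        have ht : (max (n - (examples.length : Int)) 1).toNat = 1 := by omega
        rw [ht, List.take_succ_cons, List.take_zero, List.map_cons, List.map_nil]
      · rw [if_neg (by simp; omega)]
        rw [ih]
        have ht2 : (max (n - (examples.length : Int)) 1).toNat
            = (max (n - (((examples ++ [gceContext target all_words i]).length : Nat) : Int)) 1).toNat + 1 := by
          simp only [List.length_append, List.length_cons, List.length_nil]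
          omega
        rw [ht2, List.take_succ_cons, List.map_cons]
        simp
    · have hfil : List.filter (fun p => PySem.Str.isIn target p.2) ((i, word) :: rest)
          = List.filter (fun p => PySem.Str.isIn target p.2) rest := by
        simp only [List.filter_cons]
        rw [if_neg]
        simpa using hm
      rw [if_neg hm, ih, hfil]

-- B's loop collects, beyond `examples`, the windows of the next max(n - |examples|, 0)
-- matching entries (break checked before appending, hence the floor of 0).
theorem gceB_go_eq (shown : List String) (n : Int) :
    ∀ (L : List (Int × Bool)) (examples : List String),
      gceB_go shown n L examples
        = examples ++ (((L.filter (·.2)).map (·.1)).take (max (n - examples.length) 0).toNat).map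
            (fun i => PySem.Str.join " " (PySem.List.slice shown (some (max 0 (i - 3))) (some (i + 4)))) := by
  intro L
  induction L with
  | nil => intro examples; simp [gceB_go]
  | cons p rest ih =>
    obtain ⟨i, h⟩ := p
    intro examples
    rw [gceB_go]
    by_cases hstop : n ≤ (examples.length : Int)
    · rw [if_pos hstop]
      have ht : (max (n - (examples.length : Int)) 0).toNat = 0 := by omega
      rw [ht, List.take_zero, List.map_nil, List.append_nil]
    · rw [if_neg hstop]
      by_cases hh : h
      · rw [if_pos hh, ih]
        have hfil : List.filter (·.2) ((i, h) :: rest) = (i, h) :: List.filter (·.2) rest := by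
          simp [hh]
        have ht : (max (n - (examples.length : Int)) 0).toNat
            = (max (n - (((examples ++ [PySem.Str.join " " (PySem.List.slice shown (some (max 0 (i - 3))) (some (i + 4)))]).length : Nat) : Int)) 0).toNat + 1 := by
          simp only [List.length_append, List.length_cons, List.length_nil]
          omega
        rw [hfil, List.map_cons, ht, List.take_succ_cons, List.map_cons]
        simp
      · rw [if_neg hh, ih]
        have hfil : List.filter (·.2) ((i, h) :: rest) = List.filter (·.2) rest := by
          simp [hh]
        rw [hfil]

-- zip a list with its own map: one map over the list
theorem gceZipMap {α β γ : Type} (f : α → β) (g : α × β → γ) :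
    ∀ (l : List α), ((l.zip (l.map f)).map g) = l.map (fun x => g (x, f x)) := by
  intro l
  induction l with
  | nil => rfl
  | cons x xs ih => simp only [List.map_cons, List.zip_cons_cons, ih]

-- enumerate a mapped list
theorem gceEnumerateMap {α β : Type} (f : α → β) :
    ∀ (l : List α) (s : Int),
      PySem.List.enumerate (l.map f) s = (PySem.List.enumerate l s).map (fun p => (p.1, f p.2)) := by
  intro l
  induction l with
  | nil => intro s; simp [PySem.List.enumerate_nil]
  | cons x xs ih => intro s; simp [PySem.List.enumerate_cons, ih]

-- matched indices read off the hits table are the matched indices of the words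
theorem gceIdxs (target : String) (all_words : List String) :
    (((PySem.List.enumerate (all_words.map (fun w => PySem.Str.isIn target w)) 0).filter (·.2)).map (·.1))
      = (((PySem.List.enumerate all_words 0).filter (fun p => PySem.Str.isIn target p.2)).map (·.1)) := by
  rw [gceEnumerateMap, List.filter_map, List.map_map]
  rfl

-- for 0 ≤ i, B's clamp-free window of the pre-formatted table equals A's formatted window
theorem gceWindow (target : String) (all_words : List String) (i : Int) (hi : 0 ≤ i) :
    PySem.Str.join " " (PySem.List.slice (all_words.map (gceFmt target)) (some (max 0 (i - 3))) (some (i + 4)))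
      = gceContext target all_words i := by
  have ha : (0 : Int) ≤ max 0 (i - 3) := le_max_left _ _
  have hb1 : (0 : Int) ≤ i + 4 := by omega
  have hb2 : (0 : Int) ≤ min (all_words.length : Int) (i + 4) := by
    have : (0 : Int) ≤ (all_words.length : Int) := by positivity
    omega
  rw [gceContext, PySem.List.slice_toNat (ha := ha) (hb := hb1), PySem.List.slice_toNat (ha := ha) (hb := hb2)]
  rw [← List.map_drop, ← List.map_take]
  have h : List.take ((i + 4).toNat - (max 0 (i - 3)).toNat) (List.drop (max 0 (i - 3)).toNat all_words)
      = List.take ((min ((all_words.length : Int)) (i + 4)).toNat - (max 0 (i - 3)).toNat) (List.drop (max 0 (i - 3)).toNat all_words) := by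
    apply List.take_eq_take_iff.mpr
    simp only [List.length_drop]
    omega
  rw [h]

-- every matched index is ≥ 0
theorem gceIdxs_nonneg (target : String) (all_words : List String) (i : Int)
    (hmem : i ∈ (((PySem.List.enumerate all_words 0).filter (fun p => PySem.Str.isIn target p.2)).map (·.1))) :
    0 ≤ i := by
  obtain ⟨p, hp, hpi⟩ := List.mem_map.mp hmem
  have hp' : p ∈ PySem.List.enumerate all_words 0 := List.mem_of_mem_filter hp
  obtain ⟨k, hk, hpk⟩ := (PySem.List.mem_enumerate_iff _ _ _).mp hp'
  subst hpk
  simp at hpi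
  omega

-- B's shown table is the per-word formatting map
theorem gceShown (target : String) (all_words : List String) :
    ((all_words.zip (all_words.map (fun w => PySem.Str.isIn target w))).map
        (fun p => if p.2 then PySem.Str.join "" ["**", PySem.Str.upper p.1, "**"] else p.1))
      = all_words.map (gceFmt target) := by
  rw [gceZipMap]
  rfl

-- B as take-of-map over the matched indices
theorem gceAlt_eq (target : String) (all_words : List String) (n : Int) :
    get_context_examples_alt target all_words n
      = ((((PySem.List.enumerate all_words 0).filter (fun p => PySem.Str.isIn target p.2)).map (·.1)).take (max n 0).toNat).map
          (fun i => PySem.Str.join " " (PySem.List.slice (all_words.map (gceFmt target)) (some (max 0 (i - 3))) (some (i + 4)))) := by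
  simp only [get_context_examples_alt]
  rw [gceShown, gceB_go_eq, gceIdxs]
  norm_num

theorem gceMatches_nil_of_no_match (target : String) (all_words : List String)
    (hno : ∀ w ∈ all_words, ¬ PySem.Str.isIn target w = true) :
    ((PySem.List.enumerate all_words 0).filter (fun p => PySem.Str.isIn target p.2)) = [] := by
  simp only [List.filter_eq_nil_iff]
  intro p hp
  have hmem : p.2 ∈ all_words := by
    have := List.mem_map_of_mem (f := (·.2)) hp
    rwa [PySem.List.map_snd_enumerate] at this
  simpa using hno _ hmem

-- ===== VERDICT =====
theorem get_context_examples_spec : Claim_unchanged_get_context_examples := by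
  intro target all_words n _ hD
  rw [get_context_examples, gceA_go_eq, gceAlt_eq]
  simp only [List.length_nil, Nat.cast_zero, Int.sub_zero, List.nil_append]
  by_cases hn : 1 ≤ n
  · have hmx : max n 1 = max n 0 := by omega
    rw [hmx]
    apply List.map_congr_left
    intro i hi
    exact (gceWindow target all_words i (gceIdxs_nonneg target all_words i (List.mem_of_mem_take hi))).symm
  · have hmatch : ∀ w ∈ all_words, ¬ PySem.Str.isIn target w = true := by
      intro w hw hc
      exact hD ⟨by omega, w, hw, hc⟩
    rw [gceMatches_nil_of_no_match target all_words hmatch]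
    simp only [List.map_nil, List.take_nil]

theorem get_context_examples_changed : Claim_changed_get_context_examples := by
  unfold Claim_changed_get_context_examples; decide

theorem get_context_examples_tight : Claim_exact_get_context_examples := by
  intro target all_words n _ hD
  obtain ⟨hn, w, hw, hmw⟩ := hD
  rw [get_context_examples, gceA_go_eq, gceAlt_eq]
  have hB : (max n 0).toNat = 0 := by omega
  have hA : (max (n - (([] : List String).length : Int)) 1).toNat = 1 := by simp; omega
  rw [hA, hB]
  simp only [List.take_zero, List.map_nil, List.nil_append, ne_eq, List.map_eq_nil_iff]
  intro hnil
  have hne : (PySem.List.enumerate all_words 0).filter (fun p => PySem.Str.isIn target p.2) ≠ [] := by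
    simp only [ne_eq, List.filter_eq_nil_iff]
    push Not
    obtain ⟨i, hi, hwi⟩ := List.mem_iff_getElem.mp hw
    have hl : i < (PySem.List.enumerate all_words 0).length := by
      simpa [PySem.List.length_enumerate] using hi
    refine ⟨((i : Int), w), ?_, by simpa using hmw⟩
    rw [List.mem_iff_getElem]
    exact ⟨i, hl, by simp [PySem.List.getElem_enumerate, hwi]⟩
  rcases List.take_eq_nil_iff.mp hnil with h1 | h2
  · omega
  · exact hne (List.map_eq_nil_iff.mp h2)
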